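-- pv_equiv track=rewrite | github.com/BeardedManZhao/qq-ai-bot-codeBook | utils.py | desensitization
-- ===== SOURCE A (Python) =====
-- def desensitization(string: str) -> str:
--     """
--     数据脱敏
--     :param string: 要被脱贫的字符串
--     :return: 脱敏之后的字符串 每隔一个字符会被替换为一个星号
--     """
--     r = []
--     length = 0
--     for c in string:
--         if (length - (length >> 1 << 1)) != 0:
--             r.append('*')
--         else:
--             r.append(c)
--         length += 1
--     return ''.join(r)
-- ===== SOURCE B (Python) =====
-- def desensitization(string: str) -> str:
--     """Mask every second character with '*', consuming the string two characters at a time."""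
--     out = []
--     i = 0
--     n = len(string)
--     while i + 1 < n:
--         out.append(string[i])
--         out.append('*')
--         i += 2
--     if i < n:
--         out.append(string[i])
--     return ''.join(out)
-- ===== Notes on version B (the rewrite author's own statement) =====
-- stated objective: alternative
-- what changed: B walks the string two characters at a time (keep one, emit '*'), eliminating A's running length counter and its per-character shift-based parity test.
import Mathlib
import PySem

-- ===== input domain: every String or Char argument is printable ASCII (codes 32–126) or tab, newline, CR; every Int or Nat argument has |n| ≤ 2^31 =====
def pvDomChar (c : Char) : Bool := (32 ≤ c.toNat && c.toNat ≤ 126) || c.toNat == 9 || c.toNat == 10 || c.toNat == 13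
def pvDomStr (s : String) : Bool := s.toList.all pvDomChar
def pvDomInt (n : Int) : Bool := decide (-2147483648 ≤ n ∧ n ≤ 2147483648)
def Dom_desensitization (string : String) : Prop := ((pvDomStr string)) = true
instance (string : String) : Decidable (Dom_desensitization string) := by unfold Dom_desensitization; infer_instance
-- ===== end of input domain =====

-- B masks every second character by consuming the string two characters at a time, replacing A's
-- running counter and per-character shift-based parity branch (objective: alternative; return value only).

-- ===== PORT A =====
-- A's for-loop over the string with state (r, length); Python's '>>'/'<<' on ints are Lean's '>>>'/'<<<' (exact).
def desensitizationGo : List Char → List Char → Int → List Char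
  | [], r, _ => r
  | c :: cs, r, length =>
    if length - (length >>> (1 : Nat) <<< (1 : Nat)) ≠ 0 then
      desensitizationGo cs (r ++ ['*']) (length + 1)
    else
      desensitizationGo cs (r ++ [c]) (length + 1)

def desensitization (string : String) : String :=
  String.ofList (desensitizationGo string.toList [] 0)

-- ===== PORT B =====
-- Source B's while loop 'while i+1 < n' stepping i by 2, with the trailing 'if i < n' single character,
-- transcribed as recursion over the remaining characters two at a time.
def desensitizationAltGo : List Char → List Char
  | [] => []
  | [c] => [c]
  | a :: _ :: t => a :: '*' :: desensitizationAltGo t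

def desensitization_alt (string : String) : String :=
  String.ofList (desensitizationAltGo string.toList)

-- ===== PRECONDITION & SPEC =====
def Spec_desensitization (string : String) (out : String) : Prop := out = desensitization_alt string
instance (string : String) (out : String) : Decidable (Spec_desensitization string out) := by unfold Spec_desensitization; infer_instance

-- ===== CLAIM (what is proved, stated in full; the proofs are below) =====
def Claim_equal_desensitization : Prop := ∀ (string : String), Dom_desensitization string → Spec_desensitization string (desensitization string)

-- ===== LEMMAS AND PROOFS =====

lemma shift_pair (n : Int) : n >>> (1 : Nat) <<< (1 : Nat) = n / 2 * 2 := by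
  have h1 : n >>> (1 : Nat) = n / 2 := by simpa using Int.shiftRight_eq_div_pow n 1
  rw [h1, Int.shiftLeft_eq]; ring_nf

lemma goA_cons_even (c : Char) (cs r : List Char) (n : Int) (hn : n % 2 = 0) :
    desensitizationGo (c :: cs) r n = desensitizationGo cs (r ++ [c]) (n + 1) := by
  rw [desensitizationGo, shift_pair, if_neg (by omega)]

lemma goA_cons_odd (c : Char) (cs r : List Char) (n : Int) (hn : n % 2 = 1) :
    desensitizationGo (c :: cs) r n = desensitizationGo cs (r ++ ['*']) (n + 1) := by
  rw [desensitizationGo, shift_pair, if_pos (by omega)]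

lemma go_eq (cs : List Char) : ∀ (r : List Char) (n : Int), n % 2 = 0 →
    desensitizationGo cs r n = r ++ desensitizationAltGo cs := by
  induction cs using desensitizationAltGo.induct with
  | case1 => intro r n _; simp [desensitizationGo, desensitizationAltGo]
  | case2 c =>
    intro r n hn
    rw [goA_cons_even c [] r n hn]
    simp [desensitizationGo, desensitizationAltGo]
  | case3 a b t ih =>
    intro r n hn
    rw [goA_cons_even a (b :: t) r n hn, goA_cons_odd b t (r ++ [a]) (n + 1) (by omega),
      ih (r ++ [a] ++ ['*']) (n + 1 + 1) (by omega)]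
    simp [desensitizationAltGo]

-- ===== VERDICT (by name: the statement is the Claim_ definition above) =====
theorem desensitization_spec : Claim_equal_desensitization := by
  intro s _
  unfold Spec_desensitization desensitization desensitization_alt
  rw [go_eq s.toList [] 0 (by decide)]
  rfl
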